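-- pv_equiv track=rewrite | github.com/s-tefan/aoc2024 | 06/aoc_2024_06_take3.py | annanfix
-- ===== SOURCE A (Python) =====
-- dirmarkers = '^>v<'
--
-- def annanfix(lines):
--     dirs = [(-1,0),(0,1),(1,0),(0,-1)]
--     obstacle_lines = [
--         list(filter(lambda n: n != None, [k if c == "#" else None for k,c in enumerate(line)])) for line in lines
--     ]
--     obstacle_columns = [
--         list(filter(lambda n: n != None, [r if line[k] == "#" else None for r, line in enumerate(lines)])) for k in range(len(lines[0]))
--         ]
--     for r, line in enumerate(lines):
--         for k, c in enumerate(line):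
--             if c in dirmarkers:
--                 startpos = (r, k)
--                 dirnumber = dirmarkers.index(c)
--                 break
--     dirs = [(-1,0),(0,1),(1,0),(0,-1)]
--     return startpos, (obstacle_lines, obstacle_columns), dirs, dirnumber
-- ===== SOURCE B (Python) =====
-- dirmarkers = '^>v<'
--
-- def annanfix(lines):
--     # one pass over the grid building both obstacle tables and the start marker
--     width = len(lines[0])
--     obstacle_lines = []
--     obstacle_columns = [[] for _ in range(width)]
--     start = None
--     dirnumber = None
--     for r, line in enumerate(lines):
--         row = []
--         first = None
--         for k, c in enumerate(line):
--             if c == '#':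
--                 row.append(k)
--                 if k < width:
--                     obstacle_columns[k].append(r)
--             elif first is None and c in dirmarkers:
--                 first = ((r, k), dirmarkers.index(c))
--         obstacle_lines.append(row)
--         if first is not None:
--             start, dirnumber = first
--     return start, (obstacle_lines, obstacle_columns), [(-1,0),(0,1),(1,0),(0,-1)], dirnumber
-- ===== Notes on version B (the rewrite author's own statement) =====
-- stated objective: alternative
-- what changed: B builds the row table, the column table and the start marker in ONE fused traversal of the grid (appending column hits into a preallocated per-column list and recording each row's first marker), instead of A's three separate passes (a row comprehension, a transposed column scan re-indexing every line, and a third marker-search loop).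
import Mathlib
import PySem

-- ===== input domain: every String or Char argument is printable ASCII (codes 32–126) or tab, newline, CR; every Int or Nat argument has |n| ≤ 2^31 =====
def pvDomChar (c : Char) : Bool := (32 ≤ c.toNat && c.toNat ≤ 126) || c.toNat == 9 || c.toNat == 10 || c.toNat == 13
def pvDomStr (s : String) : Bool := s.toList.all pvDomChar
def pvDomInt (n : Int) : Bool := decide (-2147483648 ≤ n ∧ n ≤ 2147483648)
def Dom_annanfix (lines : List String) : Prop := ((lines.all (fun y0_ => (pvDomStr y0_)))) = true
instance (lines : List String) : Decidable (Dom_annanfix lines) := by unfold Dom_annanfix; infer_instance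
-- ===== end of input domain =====

-- B fuses A's three passes (row table, transposed column scan, marker search) into one traversal; same output, proved equal on Pre_.

-- ===== PORT A =====
def pvDirmarkers : List Char := ['^', '>', 'v', '<']

-- [k if c == "#" else None for k,c in enumerate(line)], then filter(!= None)
def pvRowObsA (line : String) : List Int :=
  ((PySem.List.enumerate line.toList).map
      (fun kc => if kc.2 = '#' then some kc.1 else none)).filterMap id

-- inner 'for k, c in enumerate(line): if c in dirmarkers: …; break' (first hit wins)
def pvFindMarkerA (line : String) : Option (Int × Int) :=
  (PySem.List.enumerate line.toList).findSome? (fun kc =>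
    if kc.2 ∈ pvDirmarkers then
      some (kc.1, ((PySem.List.index? pvDirmarkers kc.2).getD 0 : Int))
    else none)

def annanfix (lines : List String) :
    (Int × Int) × (List (List Int) × List (List Int)) × (List (Int × Int)) × Int :=
  let obstacle_lines := lines.map pvRowObsA
  let width := (lines.headD "").toList.length      -- len(lines[0]); empty input excluded by Pre_
  let obstacle_columns := (List.range width).map (fun (k : Nat) =>
    ((PySem.List.enumerate lines).map (fun rl =>
        if PySem.Str.pyGet? rl.2 (Int.ofNat k) = some '#' then some rl.1 else none)).filterMap id)
  -- outer loop: each marker-bearing row overwrites startpos/dirnumber (break is inner-only)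
  let st := (PySem.List.enumerate lines).foldl (fun st rl =>
      match pvFindMarkerA rl.2 with
      | some ki => some ((rl.1, ki.1), ki.2)
      | none => st) (none : Option ((Int × Int) × Int))
  let sd := st.getD ((0, 0), 0)                    -- undefined (NameError) without a marker: excluded by Pre_
  (sd.1, (obstacle_lines, obstacle_columns), [(-1, 0), (0, 1), (1, 0), (0, -1)], sd.2)

-- ===== PORT B =====
-- inner loop body of Source B: state = (row, obstacle_columns, first)
def pvInnerB (r : Int) (width : Nat)
    (st : List Int × List (List Int) × Option ((Int × Int) × Int)) (kc : Int × Char) :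
    List Int × List (List Int) × Option ((Int × Int) × Int) :=
  if kc.2 = '#' then
    (st.1 ++ [kc.1],
     if kc.1 < (width : Int) then st.2.1.modify kc.1.toNat (· ++ [r]) else st.2.1,
     st.2.2)
  else if st.2.2 = none ∧ kc.2 ∈ pvDirmarkers then
    (st.1, st.2.1, some ((r, kc.1), ((PySem.List.index? pvDirmarkers kc.2).getD 0 : Int)))
  else st

-- outer loop body: run the row, append the row list, fold in columns, overwrite start
def pvStepB (width : Nat)
    (st : List (List Int) × List (List Int) × Option ((Int × Int) × Int)) (rl : Int × String) :
    List (List Int) × List (List Int) × Option ((Int × Int) × Int) :=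
  let inner := (PySem.List.enumerate rl.2.toList).foldl (pvInnerB rl.1 width) ([], st.2.1, none)
  (st.1 ++ [inner.1], inner.2.1,
   match inner.2.2 with
   | some f => some f
   | none => st.2.2)

def annanfix_alt (lines : List String) :
    (Int × Int) × (List (List Int) × List (List Int)) × (List (Int × Int)) × Int :=
  let width := (lines.headD "").toList.length
  let res := (PySem.List.enumerate lines).foldl (pvStepB width)
      ([], List.replicate width [], none)
  let sd := res.2.2.getD ((0, 0), 0)
  (sd.1, (res.1, res.2.1), [(-1, 0), (0, 1), (1, 0), (0, -1)], sd.2)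

-- ===== PRECONDITION & SPEC =====
-- Pre_ excludes exactly the inputs where the Python A raises: the empty list (lines[0] IndexError),
-- a line shorter than lines[0] (IndexError in the column scan), and grids without a direction
-- marker (startpos/dirnumber NameError).
def Pre_annanfix (lines : List String) : Prop :=
  lines ≠ [] ∧
  (∀ line ∈ lines, (lines.headD "").toList.length ≤ line.toList.length) ∧
  ((lines.any (fun line => line.toList.any (fun c => pvDirmarkers.contains c))) = true)
instance (lines : List String) : Decidable (Pre_annanfix lines) := by unfold Pre_annanfix; infer_instance

def pvWitness_annanfix : List String := ["#.", ".^"]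

def Spec_annanfix (lines : List String) (out : (Int × Int) × (List (List Int) × List (List Int)) × (List (Int × Int)) × Int) : Prop := out = annanfix_alt lines
instance (lines : List String) (out : (Int × Int) × (List (List Int) × List (List Int)) × (List (Int × Int)) × Int) : Decidable (Spec_annanfix lines out) := by unfold Spec_annanfix; infer_instance

-- ===== CLAIM (what is proved, stated in full; the proofs are below) =====
def Claim_equal_annanfix : Prop := ∀ (lines : List String), Dom_annanfix lines → Pre_annanfix lines → Spec_annanfix lines (annanfix lines)

-- ===== LEMMAS AND PROOFS =====

-- proof-side component functions of pvInnerB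
def pvFRow (row : List Int) (kc : Int × Char) : List Int :=
  if kc.2 = '#' then row ++ [kc.1] else row

def pvFCols (r : Int) (width : Nat) (cols : List (List Int)) (kc : Int × Char) : List (List Int) :=
  if kc.2 = '#' then
    (if kc.1 < (width : Int) then cols.modify kc.1.toNat (· ++ [r]) else cols)
  else cols

def pvFFirst (r : Int) (first : Option ((Int × Int) × Int)) (kc : Int × Char) :
    Option ((Int × Int) × Int) :=
  if kc.2 = '#' then first
  else if first = none ∧ kc.2 ∈ pvDirmarkers then
    some ((r, kc.1), ((PySem.List.index? pvDirmarkers kc.2).getD 0 : Int))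
  else first

lemma innerB_decomp (r : Int) (width : Nat) (l : List (Int × Char))
    (row : List Int) (cols : List (List Int)) (first : Option ((Int × Int) × Int)) :
    l.foldl (pvInnerB r width) (row, cols, first) =
      (l.foldl pvFRow row, l.foldl (pvFCols r width) cols, l.foldl (pvFFirst r) first) := by
  induction l generalizing row cols first with
  | nil => rfl
  | cons kc l ih =>
      simp only [List.foldl_cons]
      rw [show pvInnerB r width (row, cols, first) kc
            = (pvFRow row kc, pvFCols r width cols kc, pvFFirst r first kc) from ?_]
      · exact ih _ _ _
      · simp only [pvInnerB, pvFRow, pvFCols, pvFFirst]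
        split_ifs <;> simp_all

lemma fRow_spec (l : List (Int × Char)) (acc : List Int) :
    l.foldl pvFRow acc = acc ++ l.filterMap (fun kc => if kc.2 = '#' then some kc.1 else none) := by
  induction l generalizing acc with
  | nil => simp
  | cons kc l ih =>
      simp only [List.foldl_cons, List.filterMap_cons, pvFRow]
      by_cases h : kc.2 = '#' <;> simp [h, ih]

lemma rowFold_eq (line : String) :
    (PySem.List.enumerate line.toList).foldl pvFRow [] = pvRowObsA line := by
  rw [fRow_spec, pvRowObsA, List.filterMap_map]
  simp [Function.comp]

lemma fFirst_some (r : Int) (l : List (Int × Char)) (x : (Int × Int) × Int) :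
    l.foldl (pvFFirst r) (some x) = some x := by
  induction l with
  | nil => rfl
  | cons kc l ih => simp only [List.foldl_cons, pvFFirst]; split_ifs <;> simp_all

lemma firstFold_eq (r : Int) (line : String) :
    (PySem.List.enumerate line.toList).foldl (pvFFirst r) none
      = (pvFindMarkerA line).map (fun ki => ((r, ki.1), ki.2)) := by
  rw [pvFindMarkerA]
  generalize (PySem.List.enumerate line.toList) = l
  induction l with
  | nil => rfl
  | cons kc l ih =>
      rw [List.foldl_cons, List.findSome?_cons]
      by_cases h1 : kc.2 = '#'
      · have hm : kc.2 ∉ pvDirmarkers := by rw [h1]; decide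
        rw [if_neg hm]
        simp only [pvFFirst, if_pos h1]
        exact ih
      · by_cases h2 : kc.2 ∈ pvDirmarkers
        · rw [if_pos h2]
          simp only [pvFFirst, if_neg h1]
          rw [if_pos ⟨trivial, h2⟩, fFirst_some]
          rfl
        · rw [if_neg h2]
          simp only [pvFFirst, if_neg h1]
          rw [if_neg (by simp [h2])]
          exact ih

-- one row's effect on one column
lemma colsFold_getElem? (r : Int) (width : Nat) (cs : List Char) (s : Nat)
    (cols : List (List Int)) (k : Nat) :
    ((PySem.List.enumerate cs (s : Int)).foldl (pvFCols r width) cols)[k]? =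
      if s ≤ k ∧ cs[k - s]? = some '#' ∧ k < width then (cols[k]?).map (· ++ [r])
      else cols[k]? := by
  induction cs generalizing s cols with
  | nil => simp
  | cons c cs ih =>
      rw [PySem.List.enumerate_cons, List.foldl_cons]
      have hcast : ((s : Int) + 1) = ((s + 1 : Nat) : Int) := by push_cast; ring
      rw [hcast, ih]
      have hstep : (pvFCols r width cols ((s : Int), c))[k]? =
          if s = k ∧ c = '#' ∧ k < width then (cols[k]?).map (· ++ [r]) else cols[k]? := by
        by_cases hc : c = '#'
        · by_cases hw2 : s < width
          · have hwI : (s : Int) < (width : Int) := by exact_mod_cast hw2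
            have hs : (s : Int).toNat = s := by omega
            have h1 : pvFCols r width cols ((s : Int), c) = cols.modify s (· ++ [r]) := by
              simp [pvFCols, hc, hwI, hs]
            rw [h1, List.getElem?_modify]
            by_cases hk : s = k
            · rw [if_pos ⟨hk, hc, hk ▸ hw2⟩]
              cases cols[k]? <;> simp [hk]
            · rw [if_neg (by tauto)]
              cases cols[k]? <;> simp [hk]
          · have hwI : ¬ (s : Int) < (width : Int) := by exact_mod_cast hw2
            have h1 : pvFCols r width cols ((s : Int), c) = cols := by
              simp [pvFCols, hc, hwI]
            rw [h1, if_neg (by rintro ⟨hk, _, h⟩; exact hw2 (hk ▸ h))]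
        · have h1 : pvFCols r width cols ((s : Int), c) = cols := by
            simp [pvFCols, hc]
          rw [h1, if_neg (by tauto)]
      rw [hstep]
      rcases Nat.lt_trichotomy s k with hlt | hek | hgt
      · have hsub : k - s = (k - (s + 1)) + 1 := by omega
        have hne : ¬ (s = k ∧ c = '#' ∧ k < width) := by
          rintro ⟨hk, _, _⟩; omega
        rw [if_neg hne]
        have h2 : (s + 1 ≤ k ∧ cs[k - (s + 1)]? = some '#' ∧ k < width)
            ↔ (s ≤ k ∧ (c :: cs)[k - s]? = some '#' ∧ k < width) := by
          rw [hsub, List.getElem?_cons_succ]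
          constructor
          · rintro ⟨_, h', h''⟩; exact ⟨by omega, h', h''⟩
          · rintro ⟨_, h', h''⟩; exact ⟨by omega, h', h''⟩
        rw [if_congr h2 rfl rfl]
      · have h1 : ¬ (s + 1 ≤ k) := by omega
        rw [if_neg (by rintro ⟨h, _, _⟩; exact h1 h)]
        have hk0 : k - s = 0 := by omega
        by_cases hcw : c = '#' ∧ k < width
        · rw [if_pos ⟨hek, hcw.1, hcw.2⟩, if_pos ⟨by omega, by simp [hk0, hcw.1], hcw.2⟩]
        · rw [if_neg (by rintro ⟨_, h', h''⟩; exact hcw ⟨h', h''⟩),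
            if_neg (by rintro ⟨_, h', h''⟩; rw [hk0] at h'; simp at h'; exact hcw ⟨h', h''⟩)]
      · have h1 : ¬ (s + 1 ≤ k) := by omega
        have h2 : ¬ (s ≤ k) := by omega
        rw [if_neg (by rintro ⟨h, _, _⟩; exact h1 h),
          if_neg (by rintro ⟨hk, _, _⟩; omega),
          if_neg (by rintro ⟨h, _, _⟩; exact h2 h)]

-- proof-side component functions of pvStepB
def pvGRows (rows : List (List Int)) (rl : Int × String) : List (List Int) :=
  rows ++ [(PySem.List.enumerate rl.2.toList).foldl pvFRow []]

def pvGCols (width : Nat) (cols : List (List Int)) (rl : Int × String) : List (List Int) :=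
  (PySem.List.enumerate rl.2.toList).foldl (pvFCols rl.1 width) cols

def pvGStart (st : Option ((Int × Int) × Int)) (rl : Int × String) : Option ((Int × Int) × Int) :=
  match (PySem.List.enumerate rl.2.toList).foldl (pvFFirst rl.1) none with
  | some f => some f
  | none => st

lemma stepB_decomp (width : Nat) (l : List (Int × String))
    (rows cols : List (List Int)) (st : Option ((Int × Int) × Int)) :
    l.foldl (pvStepB width) (rows, cols, st) =
      (l.foldl pvGRows rows, l.foldl (pvGCols width) cols, l.foldl pvGStart st) := by
  induction l generalizing rows cols st with
  | nil => rfl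
  | cons rl l ih =>
      simp only [List.foldl_cons]
      rw [show pvStepB width (rows, cols, st) rl
            = (pvGRows rows rl, pvGCols width cols rl, pvGStart st rl) from ?_]
      · exact ih _ _ _
      · simp only [pvStepB, pvGRows, pvGCols, pvGStart, innerB_decomp]

lemma gRows_eq (lines : List String) :
    (PySem.List.enumerate lines).foldl pvGRows [] = lines.map pvRowObsA := by
  calc (PySem.List.enumerate lines).foldl pvGRows []
      = (PySem.List.enumerate lines).foldl (fun rows rl => rows ++ [pvRowObsA rl.2]) [] := by
        apply PySem.List.foldl_congr_mem
        intro acc rl _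
        rw [pvGRows, rowFold_eq]
    _ = (PySem.List.enumerate lines).map (fun rl => pvRowObsA rl.2) := by
        rw [PySem.List.foldl_append_singleton_eq_map]; simp
    _ = lines.map pvRowObsA := by
        rw [show (fun rl : Int × String => pvRowObsA rl.2) = pvRowObsA ∘ (fun rl => rl.2) from rfl,
          ← List.map_map, PySem.List.map_snd_enumerate]

lemma gStart_eq (lines : List String) :
    (PySem.List.enumerate lines).foldl pvGStart none =
      (PySem.List.enumerate lines).foldl (fun st rl =>
        match pvFindMarkerA rl.2 with
        | some ki => some ((rl.1, ki.1), ki.2)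
        | none => st) (none : Option ((Int × Int) × Int)) := by
  apply PySem.List.foldl_congr_mem
  intro acc rl _
  simp only [pvGStart, firstFold_eq]
  cases pvFindMarkerA rl.2 <;> rfl

lemma gCols_getElem? (width : Nat) (l : List (Int × String)) (cols : List (List Int)) (k : Nat) :
    (l.foldl (pvGCols width) cols)[k]? =
      if k < width then
        (cols[k]?).map (· ++ l.filterMap (fun rl =>
          if rl.2.toList[k]? = some '#' then some rl.1 else none))
      else cols[k]? := by
  induction l generalizing cols with
  | nil =>
      simp only [List.foldl_nil, List.filterMap_nil]
      split_ifs <;> cases cols[k]? <;> simp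
  | cons rl l ih =>
      rw [List.foldl_cons, ih]
      have hstep : (pvGCols width cols rl)[k]? =
          if rl.2.toList[k]? = some '#' ∧ k < width then (cols[k]?).map (· ++ [rl.1])
          else cols[k]? := by
        rw [pvGCols, show (0 : Int) = ((0 : Nat) : Int) from rfl, colsFold_getElem?]
        simp
      by_cases hw : k < width
      · rw [hstep]
        simp only [List.filterMap_cons]
        by_cases hc : rl.2.toList[k]? = some '#'
        · simp [hc, hw]
          cases cols[k]? <;> simp
        · simp [hc, hw]
      · simp only [if_neg hw] at *
        rw [hstep]
        simp [hw]

lemma gCols_eq (lines : List String) (width : Nat) :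
    (PySem.List.enumerate lines).foldl (pvGCols width) (List.replicate width []) =
      (List.range width).map (fun (k : Nat) =>
        ((PySem.List.enumerate lines).map (fun rl =>
            if PySem.Str.pyGet? rl.2 (Int.ofNat k) = some '#' then some rl.1 else none)).filterMap id) := by
  apply List.ext_getElem?
  intro k
  rw [gCols_getElem?]
  by_cases hw : k < width
  · rw [if_pos hw, List.getElem?_replicate, if_pos hw, List.getElem?_map,
      List.getElem?_range hw]
    simp only [Option.map_some, List.nil_append]
    congr 1
    rw [List.filterMap_map]
    apply List.filterMap_congr
    intro rl _
    simp [Function.comp, PySem.Str.pyGet?]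
  · rw [if_neg hw, List.getElem?_eq_none (l := List.replicate width ([] : List Int)) (by simpa using hw),
      List.getElem?_eq_none (by simp; omega)]

-- ===== VERDICT (by name: the statement is the Claim_ definition above) =====
theorem annanfix_spec : Claim_equal_annanfix := by
  intro lines _ _
  show annanfix lines = annanfix_alt lines
  unfold annanfix annanfix_alt
  simp only [stepB_decomp, gRows_eq, gStart_eq, gCols_eq]
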